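-- pv_equiv track=rewrite | github.com/lindalala/adventofcode24 | day9/main.py | getNones
-- ===== SOURCE A (Python) =====
-- def getNones(blocks, maxI):
--   nones = {}
--   idx,count = 0,0
--   for bi,b in enumerate(blocks):
--     if bi > maxI: break
--     if b is None:
--       count += 1
--       if bi == len(blocks)-1 or blocks[bi+1] is not None:
--         nones[idx+1] = count
--         count = 0
--     else:
--       idx = bi
--   return nones
-- ===== SOURCE B (Python) =====
-- def getNones(blocks, maxI):
--   nones = {}
--   n = len(blocks)
--   i = 0
--   last = 0
--   while i < n and i <= maxI:
--     if blocks[i] is not None: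
--       last = i
--       i += 1
--     else:
--       j = i
--       while j < n and blocks[j] is None:
--         j += 1
--       if j - 1 <= maxI:
--         nones[last + 1] = j - i
--       i = j
--   return nones
-- ===== Notes on version B (the rewrite author's own statement) =====
-- stated objective: alternative
-- what changed: Replaced A's single enumerate pass with per-element count accumulation and flush-on-run-end by a two-pointer scanner: an outer index loop that records the last non-None index and, on a None, an inner pointer that jumps to the run's end, emitting the run length j-i at once if the run ends by maxI.
import Mathlib
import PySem

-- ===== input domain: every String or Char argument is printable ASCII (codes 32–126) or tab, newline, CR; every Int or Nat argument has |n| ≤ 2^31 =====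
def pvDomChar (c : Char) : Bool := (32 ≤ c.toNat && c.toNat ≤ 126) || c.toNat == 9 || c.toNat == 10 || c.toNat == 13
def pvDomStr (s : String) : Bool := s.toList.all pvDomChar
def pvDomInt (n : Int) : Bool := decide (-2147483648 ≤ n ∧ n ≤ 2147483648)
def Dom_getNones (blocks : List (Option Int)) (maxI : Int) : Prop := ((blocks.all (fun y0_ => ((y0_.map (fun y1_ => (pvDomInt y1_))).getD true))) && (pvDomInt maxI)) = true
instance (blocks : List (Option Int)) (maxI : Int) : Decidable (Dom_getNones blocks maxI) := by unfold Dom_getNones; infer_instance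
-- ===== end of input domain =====

-- B replaces A's per-element count/flush state machine by a two-pointer run scanner (inner scan finds each None run's end); same value, alternative decomposition.

-- ===== PORT A =====
-- A's for-loop with break: structural recursion over the remaining list, carrying
-- (bi, nones, idx, count); blocks[bi+1] is ported with PySem.List.pyGet? (exact).
def getNones.loop (blocks : List (Option Int)) (maxI : Int) :
    List (Option Int) → Nat → PySem.Dict Int Int → Int → Int → PySem.Dict Int Int
  | [], _, nones, _, _ => nones
  | b :: rest, bi, nones, idx, count =>
    if (bi : Int) > maxI then nones
    else
      match b with
      | none =>
        -- count += 1; flush if at end of list or next block is not None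
        if bi = blocks.length - 1 ∨ ((PySem.List.pyGet? blocks ((bi : Int) + 1)).getD none).isSome then
          getNones.loop blocks maxI rest (bi + 1) (nones.insert (idx + 1) (count + 1)) idx 0
        else
          getNones.loop blocks maxI rest (bi + 1) nones idx (count + 1)
      | some _ =>
        getNones.loop blocks maxI rest (bi + 1) nones (bi : Int) count

def getNones (blocks : List (Option Int)) (maxI : Int) : List (Int × Int) :=
  (getNones.loop blocks maxI blocks 0 PySem.Dict.empty 0 0).items

-- ===== PORT B =====
-- inner 'while j < n and blocks[j] is None: j += 1' (blocks[j] with j < n: List.getD is exact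
-- there); fuel makes the while-loop total — blocks.length - j steps always suffice
def getNones_alt.scan (blocks : List (Option Int)) : Nat → Nat → Nat
  | 0, j => j
  | fuel + 1, j =>
    if j < blocks.length ∧ blocks.getD j none = none then getNones_alt.scan blocks fuel (j + 1) else j

-- outer 'while i < n and i <= maxI' loop, carrying (i, last, nones); fuel = blocks.length suffices
-- since i strictly increases each iteration
def getNones_alt.outer (blocks : List (Option Int)) (maxI : Int) :
    Nat → Nat → Int → PySem.Dict Int Int → PySem.Dict Int Int
  | 0, _, _, nones => nones
  | fuel + 1, i, last, nones =>
    if i < blocks.length ∧ (i : Int) ≤ maxI then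
      if (blocks.getD i none).isSome then
        getNones_alt.outer blocks maxI fuel (i + 1) (i : Int) nones
      else
        let j := getNones_alt.scan blocks (blocks.length - i) i
        let nones' := if (j : Int) - 1 ≤ maxI then nones.insert (last + 1) ((j : Int) - (i : Int)) else nones
        getNones_alt.outer blocks maxI fuel j last nones'
    else nones

def getNones_alt (blocks : List (Option Int)) (maxI : Int) : List (Int × Int) :=
  (getNones_alt.outer blocks maxI blocks.length 0 0 PySem.Dict.empty).items

-- ===== PRECONDITION & SPEC =====
def Spec_getNones (blocks : List (Option Int)) (maxI : Int) (out : List (Int × Int)) : Prop := out = getNones_alt blocks maxI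
instance (blocks : List (Option Int)) (maxI : Int) (out : List (Int × Int)) : Decidable (Spec_getNones blocks maxI out) := by unfold Spec_getNones; infer_instance

-- ===== CLAIM (what is proved, stated in full; the proofs are below) =====
def Claim_equal_getNones : Prop := ∀ (blocks : List (Option Int)) (maxI : Int), Dom_getNones blocks maxI → Spec_getNones blocks maxI (getNones blocks maxI)

-- ===== LEMMAS AND PROOFS =====

-- proof-side abbreviation: the inner scan at position j with its call-site fuel
def scanF (blocks : List (Option Int)) (j : Nat) : Nat :=
  getNones_alt.scan blocks (blocks.length - j) j

theorem scan_stop (blocks : List (Option Int)) (f j : Nat)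
    (h : ¬ (j < blocks.length ∧ blocks.getD j none = none)) :
    getNones_alt.scan blocks f j = j := by
  cases f with
  | zero => rfl
  | succ f => simp only [getNones_alt.scan, if_neg h]

theorem scan_fuel (blocks : List (Option Int)) :
    ∀ (f f' j : Nat), blocks.length - j ≤ f → blocks.length - j ≤ f' →
    getNones_alt.scan blocks f j = getNones_alt.scan blocks f' j := by
  intro f
  induction f with
  | zero =>
    intro f' j hf hf'
    rw [scan_stop blocks f' j (by rintro ⟨h1, _⟩; omega)]
    rfl
  | succ f ih =>
    intro f' j hf hf'
    by_cases h : j < blocks.length ∧ blocks.getD j none = none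
    · have hlt := h.1
      cases f' with
      | zero => omega
      | succ f' =>
        simp only [getNones_alt.scan, if_pos h]
        exact ih f' (j + 1) (by omega) (by omega)
    · rw [scan_stop blocks _ j h, scan_stop blocks f' j h]

theorem scanF_stop (blocks : List (Option Int)) (j : Nat)
    (h : ¬ (j < blocks.length ∧ blocks.getD j none = none)) : scanF blocks j = j :=
  scan_stop blocks _ j h

theorem scanF_step (blocks : List (Option Int)) (j : Nat)
    (h1 : j < blocks.length) (h2 : blocks.getD j none = none) :
    scanF blocks j = scanF blocks (j + 1) := by
  unfold scanF
  have hf : blocks.length - j = (blocks.length - j - 1) + 1 := by omega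
  rw [hf]
  simp only [getNones_alt.scan, if_pos (And.intro h1 h2)]
  exact scan_fuel blocks _ _ (j + 1) (by omega) (by omega)

theorem scanF_ge (blocks : List (Option Int)) : ∀ (j : Nat), j ≤ scanF blocks j := by
  have key : ∀ (f j : Nat), j ≤ getNones_alt.scan blocks f j := by
    intro f
    induction f with
    | zero => intro j; exact le_refl j
    | succ f ih =>
      intro j
      simp only [getNones_alt.scan]
      split
      · have := ih (j + 1); omega
      · exact le_refl j
  intro j; exact key _ j

-- A's loop inside a None run starting at k (count so far c): it flushes c + (j - k) at key last+1
-- iff the run's last index j-1 is ≤ maxI, where j = scanF blocks k; otherwise it breaks with nones.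
theorem run_lemma (blocks : List (Option Int)) (maxI : Int) :
    ∀ (m k : Nat) (c : Int) (nones : PySem.Dict Int Int) (last : Int),
    blocks.length - k ≤ m → k < blocks.length → blocks.getD k none = none →
    getNones.loop blocks maxI (blocks.drop k) k nones last c =
      (if (k : Int) > maxI then nones
       else if ((scanF blocks k : Int) - 1 ≤ maxI) then
         getNones.loop blocks maxI (blocks.drop (scanF blocks k)) (scanF blocks k)
           (nones.insert (last + 1) (c + ((scanF blocks k - k : Nat) : Int))) last 0
       else nones) := by
  intro m
  induction m with
  | zero => intro k c nones last hm hk _; omega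
  | succ m ih =>
    intro k c nones last hm hk hnone
    have hdrop : blocks.drop k = blocks[k] :: blocks.drop (k + 1) := List.drop_eq_getElem_cons hk
    have hget : blocks[k] = none := by rw [← List.getD_eq_getElem blocks none hk]; exact hnone
    rw [hdrop, hget]
    by_cases hbr : (k : Int) > maxI
    · simp [getNones.loop, hbr]
    have hscan : scanF blocks k = scanF blocks (k + 1) := scanF_step blocks k hk hnone
    by_cases hterm : k + 1 = blocks.length ∨ blocks.getD (k + 1) none ≠ none
    · -- run terminates at k: scanF (k+1) = k+1
      have hscan2 : scanF blocks (k + 1) = k + 1 := by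
        apply scanF_stop
        rintro ⟨h1, h2⟩
        rcases hterm with h | h
        · omega
        · exact h h2
      have hflush : (k = blocks.length - 1 ∨ ((PySem.List.pyGet? blocks ((k : Int) + 1)).getD none).isSome) := by
        rcases hterm with h | h
        · left; omega
        · right
          have hlt : k + 1 < blocks.length := by
            rcases Nat.lt_or_ge (k+1) blocks.length with h' | h'
            · exact h'
            · exfalso; apply h; rw [List.getD_eq_default]; omega
          have : ((k : Int) + 1) = ((k + 1 : Nat) : Int) := by push_cast; ring
          rw [this, PySem.List.pyGet?_natCast, List.getElem?_eq_getElem hlt]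
          simp only [Option.getD_some]
          rw [← List.getD_eq_getElem blocks none hlt] at *
          cases hg : blocks.getD (k+1) none with
          | none => exact absurd hg h
          | some v => simp
      simp only [getNones.loop, if_neg hbr, if_pos hflush]
      rw [hscan, hscan2]
      have : ((k + 1 : Nat) : Int) - 1 ≤ maxI := by push_cast; omega
      rw [if_pos this]
      have : (k + 1 - k : Nat) = 1 := by omega
      rw [this]
      norm_num
    · -- run continues at k+1
      push_neg at hterm
      obtain ⟨hne, hnone2⟩ := hterm
      have hlt2 : k + 1 < blocks.length := by omega
      have hnoflush : ¬ (k = blocks.length - 1 ∨ ((PySem.List.pyGet? blocks ((k : Int) + 1)).getD none).isSome) := by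
        push_neg
        constructor
        · omega
        · have : ((k : Int) + 1) = ((k + 1 : Nat) : Int) := by push_cast; ring
          rw [this, PySem.List.pyGet?_natCast, List.getElem?_eq_getElem hlt2]
          simp only [Option.getD_some]
          rw [← List.getD_eq_getElem blocks none hlt2, hnone2]
          simp
      simp only [getNones.loop, if_neg hbr, if_neg hnoflush]
      rw [ih (k + 1) (c + 1) nones last (by omega) hlt2 hnone2]
      have hge : k + 2 ≤ scanF blocks (k + 1) := by
        have h1 : scanF blocks (k + 1) = scanF blocks (k + 2) := scanF_step blocks (k+1) hlt2 hnone2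
        have := scanF_ge blocks (k + 2)
        omega
      rw [hscan]
      set j := scanF blocks (k + 1) with hj
      by_cases hb2 : ((k + 1 : Nat) : Int) > maxI
      · rw [if_pos hb2]
        have : ¬ ((j : Int) - 1 ≤ maxI) := by push_cast at hb2 ⊢; omega
        rw [if_neg this]
      · rw [if_neg hb2]
        by_cases h3 : (j : Int) - 1 ≤ maxI
        · rw [if_pos h3, if_pos h3]
          congr 2
          push_cast [Nat.cast_sub (by omega : k + 1 ≤ j), Nat.cast_sub (by omega : k ≤ j)]
          ring
        · rw [if_neg h3, if_neg h3]

-- main invariant: A's loop from i with count 0 equals B's outer loop from i (any sufficient fuel)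
theorem main_lemma (blocks : List (Option Int)) (maxI : Int) :
    ∀ (fuel i : Nat) (nones : PySem.Dict Int Int) (last : Int),
    blocks.length - i ≤ fuel →
    getNones.loop blocks maxI (blocks.drop i) i nones last 0 =
      getNones_alt.outer blocks maxI fuel i last nones := by
  intro fuel
  induction fuel with
  | zero =>
    intro i nones last hm
    have hge : blocks.length ≤ i := by omega
    rw [List.drop_eq_nil_of_le hge]
    simp [getNones.loop, getNones_alt.outer]
  | succ fuel ih =>
    intro i nones last hm
    by_cases hin : i < blocks.length
    · have hdrop : blocks.drop i = blocks[i] :: blocks.drop (i + 1) := List.drop_eq_getElem_cons hin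
      simp only [getNones_alt.outer]
      by_cases hle : (i : Int) ≤ maxI
      · rw [if_pos ⟨hin, hle⟩]
        have hgetD : blocks.getD i none = blocks[i] := List.getD_eq_getElem blocks none hin
        cases hg : blocks[i] with
        | some v =>
          rw [hdrop, hg]
          simp only [getNones.loop, if_neg (by omega : ¬ (i : Int) > maxI)]
          rw [ih (i + 1) nones (i : Int) (by omega)]
          have hs : (blocks.getD i none).isSome := by rw [hgetD, hg]; rfl
          rw [if_pos hs]
        | none =>
          have hnone : blocks.getD i none = none := by rw [hgetD, hg]
          rw [run_lemma blocks maxI (fuel + 1) i 0 nones last hm hin hnone]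
          rw [if_neg (by omega : ¬ (i : Int) > maxI)]
          rw [if_neg (by rw [hnone]; simp : ¬ (blocks.getD i none).isSome)]
          show _ = getNones_alt.outer blocks maxI fuel (scanF blocks i) last
            (if ((scanF blocks i : Int) - 1 ≤ maxI) then
              nones.insert (last + 1) ((scanF blocks i : Int) - (i : Int)) else nones)
          set j := scanF blocks i with hj
          have hgt : i < j := by
            have h1 : j = scanF blocks (i + 1) := scanF_step blocks i hin hnone
            have := scanF_ge blocks (i + 1)
            omega
          by_cases h3 : (j : Int) - 1 ≤ maxI
          · rw [if_pos h3, if_pos h3]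
            rw [ih j (nones.insert (last + 1) (0 + ((j - i : Nat) : Int))) last (by omega)]
            congr 2
            push_cast [Nat.cast_sub (by omega : i ≤ j)]
            ring
          · rw [if_neg h3, if_neg h3]
            cases fuel with
            | zero => rfl
            | succ fuel =>
              simp only [getNones_alt.outer]
              rw [if_neg (by rintro ⟨h4, h5⟩; omega)]
      · rw [if_neg (by rintro ⟨h4, h5⟩; omega)]
        rw [hdrop]
        simp [getNones.loop, if_pos (by omega : (i : Int) > maxI)]
    · have hge : blocks.length ≤ i := by omega
      rw [List.drop_eq_nil_of_le hge]
      simp only [getNones_alt.outer]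
      rw [if_neg (by rintro ⟨h4, h5⟩; omega)]
      simp [getNones.loop]

-- ===== VERDICT (by name: the statement is the Claim_ definition above) =====
theorem getNones_spec : Claim_equal_getNones := by
  intro blocks maxI _
  unfold Spec_getNones getNones getNones_alt
  have := main_lemma blocks maxI blocks.length 0 PySem.Dict.empty 0 (by omega)
  rw [List.drop_zero] at this
  rw [this]
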